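-- pv_equiv track=rewrite | github.com/michael-angelo-mootoo/quanta-app | Rocket Engine Generator/AdiabaticCombustor3.py | close
-- ===== SOURCE A (Python) =====
-- def close(arr, target):
--     """
--     Find the two closest numbers in the array to the target number.
--
--     Parameters:
--     arr (list of int/float): The list of numbers to search through.
--     target (int/float): The target number to find the closest numbers to.
--
--     Returns:
--     list of int/float: A list containing the closest smaller and larger numbers to the target.
--     """
--     # Sort the array to ensure numbers are in order
--     arr.sort()
--
--     # Initialize variables to hold the closest smaller and larger numbers
--     smaller, larger = None, None
--
--     # Iterate through the array to find the closest smaller and larger numbers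
--     for num in arr:
--         if num < target:
--             smaller = num
--         elif num > target:
--             larger = num
--             break  # Exit loop once the first larger number is found
--
--     if smaller is None or larger is None:
--         raise IndexError(f"Index could not be dound within list, could not find {target} within {arr}")
--     return [smaller, larger]
-- ===== SOURCE B (Python) =====
-- import bisect
--
-- def close(arr, target):
--     # Sort in place, like A (caller-visible mutation preserved)
--     arr.sort()
--     lo = bisect.bisect_left(arr, target)
--     hi = bisect.bisect_right(arr, target)
--     if lo == 0 or hi == len(arr):
--         raise IndexError(f"Index could not be dound within list, could not find {target} within {arr}")
--     return [arr[lo - 1], arr[hi]]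
-- ===== Notes on version B (the rewrite author's own statement) =====
-- stated objective: idiomatic
-- what changed: A's linear scan with a break over the sorted list is replaced by two binary searches (bisect_left/bisect_right) that locate the closest smaller and larger elements directly by index.
import Mathlib
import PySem

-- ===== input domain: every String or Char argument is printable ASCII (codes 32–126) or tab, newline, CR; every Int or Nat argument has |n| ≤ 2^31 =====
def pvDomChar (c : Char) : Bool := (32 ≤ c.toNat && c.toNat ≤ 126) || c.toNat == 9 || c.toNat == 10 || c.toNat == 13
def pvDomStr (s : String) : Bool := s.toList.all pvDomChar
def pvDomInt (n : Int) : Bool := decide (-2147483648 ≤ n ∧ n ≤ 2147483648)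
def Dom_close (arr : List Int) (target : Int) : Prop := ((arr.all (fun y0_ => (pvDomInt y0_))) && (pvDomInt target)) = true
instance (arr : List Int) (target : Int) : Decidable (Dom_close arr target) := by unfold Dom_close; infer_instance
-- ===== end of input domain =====

-- B replaces A's linear scan over the sorted list by two binary searches (bisect);
-- equivalence is about the RETURN value (both sort arr in place in Python).

-- ===== PORT A =====
-- the for-loop with break: state is `smaller`; returns (smaller, larger) options
def closeLoop (target : Int) : List Int → Option Int → Option Int × Option Int
  | [], smaller => (smaller, none)
  | n :: rest, smaller =>
    if n < target then closeLoop target rest (some n)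
    else if n > target then (smaller, some n)
    else closeLoop target rest smaller

def close (arr : List Int) (target : Int) : List Int :=
  let s := PySem.List.sorted arr (fun x => x)
  match closeLoop target s none with
  | (some a, some b) => [a, b]
  | _ => []   -- Python raises IndexError here; excluded by Pre_close

-- ===== PORT B =====
def close_alt (arr : List Int) (target : Int) : List Int :=
  let s := PySem.List.sorted arr (fun x => x)
  let lo := PySem.List.bisectLeft s target
  let hi := PySem.List.bisectRight s target
  if lo == 0 || hi == s.length then []   -- Python raises IndexError here; excluded by Pre_close
  else [s.getD (lo - 1) 0, s.getD hi 0]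

-- ===== PRECONDITION & SPEC =====
-- Pre_ excludes exactly the inputs where the Python A raises IndexError:
-- no element strictly below, or none strictly above, the target.
def Pre_close (arr : List Int) (target : Int) : Prop :=
  (∃ x ∈ arr, x < target) ∧ (∃ x ∈ arr, target < x)
instance (arr : List Int) (target : Int) : Decidable (Pre_close arr target) := by
  unfold Pre_close; infer_instance

def pvWitness_close : List Int × Int := ([5, 1], 3)

def Spec_close (arr : List Int) (target : Int) (out : List Int) : Prop := out = close_alt arr target
instance (arr : List Int) (target : Int) (out : List Int) : Decidable (Spec_close arr target out) := by unfold Spec_close; infer_instance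

-- ===== CLAIM (what is proved, stated in full; the proofs are below) =====
def Claim_equal_close : Prop := ∀ (arr : List Int) (target : Int), Dom_close arr target → Pre_close arr target → Spec_close arr target (close arr target)

-- ===== LEMMAS AND PROOFS =====

-- countP is determined by a cut position: all-true below l, all-false from l on
lemma countP_of_cut (p : Int → Bool) (s : List Int) (l : Nat) (hl : l ≤ s.length)
    (h1 : ∀ j (hj : j < s.length), j < l → p s[j] = true)
    (h2 : ∀ j (hj : j < s.length), l ≤ j → p s[j] = false) :
    s.countP p = l := by
  induction s generalizing l with
  | nil => simpa using (Nat.le_zero.mp hl).symm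
  | cons a rest ih =>
    cases l with
    | zero =>
      have : ∀ x ∈ a :: rest, ¬ p x = true := by
        intro x hx
        rcases List.mem_iff_getElem.mp hx with ⟨j, hj, rfl⟩
        simp [h2 j hj (Nat.zero_le j)]
      simpa using List.countP_eq_zero.mpr this
    | succ k =>
      have hpa : p a = true := h1 0 (by simp) (Nat.succ_pos k)
      have hrest : rest.countP p = k := by
        apply ih k (by simpa using Nat.succ_le_succ_iff.mp hl)
        · intro j hj hjk
          have := h1 (j+1) (by simpa using Nat.succ_lt_succ hj) (Nat.succ_lt_succ hjk)
          simpa using this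
        · intro j hj hkj
          have := h2 (j+1) (by simpa using Nat.succ_lt_succ hj) (Nat.succ_le_succ hkj)
          simpa using this
      simp [hpa, hrest]

lemma bisectLeft_eq_countP (s : List Int) (t : Int) (hs : s.Pairwise (· ≤ ·)) :
    PySem.List.bisectLeft s t = s.countP (fun x => decide (x < t)) := by
  obtain ⟨hle, h1, h2⟩ := PySem.List.bisectLeft_spec s t hs
  exact (countP_of_cut _ s _ hle
    (fun j hj hjl => by simpa using h1 j hj hjl)
    (fun j hj hlj => by simpa using not_lt.mpr (h2 j hj hlj))).symm

lemma bisectRight_eq_countP (s : List Int) (t : Int) (hs : s.Pairwise (· ≤ ·)) :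
    PySem.List.bisectRight s t = s.countP (fun x => decide (x ≤ t)) := by
  obtain ⟨hle, h1, h2⟩ := PySem.List.bisectRight_spec s t hs
  exact (countP_of_cut _ s _ hle
    (fun j hj hjl => by simpa using h1 j hj hjl)
    (fun j hj hlj => by simpa using not_le.mpr (h2 j hj hlj))).symm

-- characterisation of A's loop on a sorted list, in terms of the two counts
lemma closeLoop_eq (t : Int) (s : List Int) (hs : s.Pairwise (· ≤ ·)) (acc : Option Int) :
    closeLoop t s acc =
      ((if 0 < s.countP (fun x => decide (x < t))
          then some (s.getD (s.countP (fun x => decide (x < t)) - 1) 0) else acc),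
       (if s.countP (fun x => decide (x ≤ t)) < s.length
          then some (s.getD (s.countP (fun x => decide (x ≤ t))) 0) else none)) := by
  induction s generalizing acc with
  | nil => simp [closeLoop]
  | cons n rest ih =>
    have hrest : rest.Pairwise (· ≤ ·) := hs.of_cons
    have hmem : ∀ y ∈ rest, n ≤ y := fun y hy => List.rel_of_pairwise_cons hs hy
    by_cases h1 : n < t
    · have hdec : decide (n < t) = true := by simpa using h1
      have hdec2 : decide (n ≤ t) = true := by simpa using le_of_lt h1
      rw [closeLoop, if_pos h1, ih hrest]
      have hc : (n :: rest).countP (fun x => decide (x < t))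
          = rest.countP (fun x => decide (x < t)) + 1 := by
        simp [hdec]
      have hc2 : (n :: rest).countP (fun x => decide (x ≤ t))
          = rest.countP (fun x => decide (x ≤ t)) + 1 := by
        simp [hdec2]
      rw [hc, hc2]
      simp only [Prod.mk.injEq]
      constructor
      · cases hcr : rest.countP (fun x => decide (x < t)) with
        | zero => simp
        | succ k => simp
      · simp only [List.length_cons, List.getD_cons_succ]
        by_cases hcl : rest.countP (fun x => decide (x ≤ t)) < rest.length
        · rw [if_pos hcl, if_pos (by omega)]
        · rw [if_neg hcl, if_neg (by omega)]
    · by_cases h2 : t < n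
      · have hall1 : ∀ x ∈ n :: rest, ¬ (decide (x < t) = true) := by
          intro x hx
          rcases List.mem_cons.mp hx with rfl | hx
          · simpa using not_lt.mpr (le_of_lt h2)
          · simpa using not_lt.mpr (le_of_lt (lt_of_lt_of_le h2 (hmem x hx)))
        have hall2 : ∀ x ∈ n :: rest, ¬ (decide (x ≤ t) = true) := by
          intro x hx
          rcases List.mem_cons.mp hx with rfl | hx
          · simpa using not_le.mpr h2
          · simpa using not_le.mpr (lt_of_lt_of_le h2 (hmem x hx))
        have hc : (n :: rest).countP (fun x => decide (x < t)) = 0 := List.countP_eq_zero.mpr hall1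
        have hc2 : (n :: rest).countP (fun x => decide (x ≤ t)) = 0 := List.countP_eq_zero.mpr hall2
        rw [closeLoop, if_neg h1, if_pos h2, hc, hc2]
        simp
      · -- n = t
        have heq : n = t := le_antisymm (not_lt.mp h2) (not_lt.mp h1)
        have hall1 : ∀ x ∈ n :: rest, ¬ (decide (x < t) = true) := by
          intro x hx
          rcases List.mem_cons.mp hx with rfl | hx
          · simpa using h1
          · simpa using not_lt.mpr (heq ▸ hmem x hx)
        have hc : (n :: rest).countP (fun x => decide (x < t)) = 0 := List.countP_eq_zero.mpr hall1
        have hc2 : (n :: rest).countP (fun x => decide (x ≤ t))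
            = rest.countP (fun x => decide (x ≤ t)) + 1 := by
          simp [heq]
        rw [closeLoop, if_neg h1, if_neg h2, ih hrest]
        have hcr : rest.countP (fun x => decide (x < t)) = 0 := by
          apply List.countP_eq_zero.mpr
          intro x hx
          simpa using not_lt.mpr (heq ▸ hmem x hx)
        rw [hc, hcr, hc2]
        simp only [Prod.mk.injEq]
        constructor
        · simp
        · simp only [List.length_cons, List.getD_cons_succ]
          by_cases hcl : rest.countP (fun x => decide (x ≤ t)) < rest.length
          · rw [if_pos hcl, if_pos (by omega)]
          · rw [if_neg hcl, if_neg (by omega)]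

-- ===== VERDICT (by name: the statement is the Claim_ definition above) =====
theorem close_spec : Claim_equal_close := by
  intro arr target _ hpre
  unfold Spec_close close close_alt
  dsimp only
  set s := PySem.List.sorted arr (fun x => x) with hsdef
  have hs : s.Pairwise (· ≤ ·) := PySem.List.sorted_pairwise arr (fun x => x)
  have hperm : s.Perm arr := PySem.List.sorted_perm arr (fun x => x) false
  obtain ⟨⟨xl, hxl, hxlt⟩, ⟨xr, hxr, hxrt⟩⟩ := hpre
  have hxl' : xl ∈ s := hperm.mem_iff.mpr hxl
  have hxr' : xr ∈ s := hperm.mem_iff.mpr hxr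
  have hlo : 0 < s.countP (fun x => decide (x < target)) :=
    List.countP_pos_iff.mpr ⟨xl, hxl', by simpa using hxlt⟩
  have hhi : s.countP (fun x => decide (x ≤ target)) < s.length := by
    rcases Nat.lt_or_ge (s.countP (fun x => decide (x ≤ target))) s.length with h | h
    · exact h
    · exfalso
      have hall : ∀ x ∈ s, (fun x => decide (x ≤ target)) x = true :=
        List.countP_eq_length.mp (Nat.le_antisymm List.countP_le_length h)
      have := hall xr hxr'
      simp at this
      omega
  rw [closeLoop_eq target s hs none, if_pos hlo, if_pos hhi,
      bisectLeft_eq_countP s target hs, bisectRight_eq_countP s target hs]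
  have h1 : (s.countP (fun x => decide (x < target)) == 0) = false := by
    simpa using Nat.pos_iff_ne_zero.mp hlo
  have h2 : (s.countP (fun x => decide (x ≤ target)) == s.length) = false := by
    simpa using Nat.ne_of_lt hhi
  rw [h1, h2]
  simp
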